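-- pv_equiv track=rewrite | github.com/carlosapz/Ejercicios-Basicos-Python-1 | Funciones/eje-3.1.py | EliminaPrimerDig
-- ===== SOURCE A (Python) =====
-- def EliminaPrimerDig(n):
--     i=0
--     c=0
--     while n>10 :
--         d=n % 10
--         n=n//10
--         i=i+(d * (10**c))
--         c=c+1
--     return (i)
-- ===== SOURCE B (Python) =====
-- def EliminaPrimerDig(n):
--     p = 10
--     while p <= n:
--         p = p * 10
--     return n % (p // 10)
-- ===== Notes on version B (the rewrite author's own statement) =====
-- stated objective: simpler
-- what changed: Instead of accumulating the low digits one by one with d*(10**c) while dividing n down, B finds the smallest power of ten exceeding n and returns a single modulus n % (p//10); the same formula covers negatives, 0..10 (modulus 1 gives 0) and the early-stop-at-10 case without any accumulator.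
import Mathlib
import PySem

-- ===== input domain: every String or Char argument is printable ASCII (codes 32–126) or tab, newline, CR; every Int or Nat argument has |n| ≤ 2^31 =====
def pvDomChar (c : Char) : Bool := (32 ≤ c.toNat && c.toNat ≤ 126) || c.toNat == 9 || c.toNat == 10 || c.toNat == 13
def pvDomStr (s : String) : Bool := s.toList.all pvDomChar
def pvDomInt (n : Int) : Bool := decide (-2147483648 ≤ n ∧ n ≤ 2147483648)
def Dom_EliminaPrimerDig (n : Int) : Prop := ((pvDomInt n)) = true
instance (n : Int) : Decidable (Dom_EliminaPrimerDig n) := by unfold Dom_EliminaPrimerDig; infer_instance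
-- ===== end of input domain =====

-- B removes the leading decimal digit with one modulus by the smallest power of ten > n,
-- replacing A's digit-by-digit accumulator loop (objective: simpler; same behaviour everywhere).

-- ===== PORT A =====
-- while n>10: d=n%10; n=n//10; i=i+d*(10**c); c=c+1
def pvLoopA (n i : Int) (c : Nat) : Int :=
  if 10 < n then
    pvLoopA (PySem.Int.floordiv n 10) (i + (PySem.Int.mod n 10) * 10 ^ c) (c + 1)
  else i
termination_by n.toNat
decreasing_by
  have h := PySem.Int.floordiv_eq_ediv_of_pos (a := n) (b := 10) (by omega)
  rw [h]; omega

def EliminaPrimerDig (n : Int) : Int := pvLoopA n 0 0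

-- ===== PORT B =====
-- p=10; while p<=n: p*=10   ('10 ≤ p' is only a totality guard; it holds on every call reached from p = 10)
def pvLoopB (n p : Int) : Int :=
  if p ≤ n ∧ 10 ≤ p then pvLoopB n (p * 10) else p
termination_by (n + 1 - p).toNat
decreasing_by omega

def EliminaPrimerDig_alt (n : Int) : Int :=
  PySem.Int.mod n (PySem.Int.floordiv (pvLoopB n 10) 10)

-- ===== PRECONDITION & SPEC =====
def Spec_EliminaPrimerDig (n : Int) (out : Int) : Prop := out = EliminaPrimerDig_alt n
instance (n : Int) (out : Int) : Decidable (Spec_EliminaPrimerDig n out) := by unfold Spec_EliminaPrimerDig; infer_instance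

-- ===== CLAIM (what is proved, stated in full; the proofs are below) =====
def Claim_equal_EliminaPrimerDig : Prop := ∀ (n : Int), Dom_EliminaPrimerDig n → Spec_EliminaPrimerDig n (EliminaPrimerDig n)

-- ===== LEMMAS AND PROOFS =====

-- A's accumulator is linear: running the loop with accumulator i and weight 10^c
-- adds 10^c times the result started from (0, 0).
theorem pvLoopA_acc : ∀ (m : Nat) (n i : Int) (c : Nat), n.toNat = m →
    pvLoopA n i c = i + 10 ^ c * pvLoopA n 0 0 := by
  intro m
  induction m using Nat.strong_induction_on with
  | _ m ih =>
    intro n i c hm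
    by_cases h : 10 < n
    · have hfd := PySem.Int.floordiv_eq_ediv_of_pos (a := n) (b := 10) (by omega)
      have hlt : (PySem.Int.floordiv n 10).toNat < m := by rw [hfd]; omega
      rw [pvLoopA, if_pos h, ih _ hlt _ _ _ rfl]
      conv_rhs => rw [pvLoopA, if_pos h, ih _ hlt _ _ _ rfl]
      ring
    · rw [pvLoopA, if_neg h]
      conv_rhs => rw [pvLoopA, if_neg h]
      ring

-- B's search commutes with dividing n by 10: p*10 on n behaves as p on n//10 (scaled by 10).
theorem pvLoopB_shift : ∀ (m : Nat) (n p : Int), (n + 1 - p * 10).toNat = m → 10 ≤ p →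
    pvLoopB n (p * 10) = 10 * pvLoopB (PySem.Int.floordiv n 10) p := by
  intro m
  induction m using Nat.strong_induction_on with
  | _ m ih =>
    intro n p hm hp
    have hfd := PySem.Int.floordiv_eq_ediv_of_pos (a := n) (b := 10) (by omega)
    have hiff : p * 10 ≤ n ↔ p ≤ PySem.Int.floordiv n 10 := by
      rw [hfd]; constructor <;> intro h <;> omega
    by_cases h : p * 10 ≤ n
    · have h2 : p ≤ PySem.Int.floordiv n 10 := hiff.mp h
      rw [pvLoopB, if_pos ⟨h, by omega⟩]
      conv_rhs => rw [pvLoopB, if_pos ⟨h2, hp⟩]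
      exact ih _ (by omega) n (p * 10) rfl (by omega)
    · rw [pvLoopB, if_neg (by tauto)]
      conv_rhs => rw [pvLoopB, if_neg (fun hc => h (hiff.mpr hc.1))]
      ring

-- The result of B's search from p is p times a power of ten.
theorem pvLoopB_pow : ∀ (m : Nat) (n p : Int), (n + 1 - p).toNat = m →
    ∃ k : Nat, pvLoopB n p = p * 10 ^ k := by
  intro m
  induction m using Nat.strong_induction_on with
  | _ m ih =>
    intro n p hm
    by_cases h : p ≤ n ∧ 10 ≤ p
    · rw [pvLoopB, if_pos h]
      obtain ⟨k, hk⟩ := ih ((n + 1 - p * 10).toNat) (by omega) n (p * 10) rfl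
      exact ⟨k + 1, by rw [hk]; ring⟩
    · rw [pvLoopB, if_neg h]; exact ⟨0, by ring⟩

-- digit-split identity for emod: n % (10*M) = n % 10 + 10 * ((n/10) % M) for M > 0
theorem pv_emod_split (n M : Int) (hM : 0 < M) :
    n % (10 * M) = n % 10 + 10 * ((n / 10) % M) := by
  have e1 : 10 * (n / 10) + n % 10 = n := Int.mul_ediv_add_emod n 10
  have e2 : M * ((n / 10) / M) + (n / 10) % M = n / 10 := Int.mul_ediv_add_emod (n / 10) M
  have key : n = (10 * ((n / 10) % M) + n % 10) + (10 * M) * ((n / 10) / M) := by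
    linear_combination -e1 - 10 * e2
  have hr0 : 0 ≤ (n / 10) % M := Int.emod_nonneg _ (by omega)
  have hrM : (n / 10) % M < M := Int.emod_lt_of_pos _ hM
  have hs0 : 0 ≤ n % 10 := Int.emod_nonneg _ (by omega)
  have hs10 : n % 10 < 10 := Int.emod_lt_of_pos _ (by omega)
  conv_lhs => rw [key]
  rw [Int.add_mul_emod_self_left, Int.emod_eq_of_lt (by omega) (by nlinarith)]
  ring

theorem pv_main : ∀ (m : Nat) (n : Int), n.toNat = m →
    pvLoopA n 0 0 = PySem.Int.mod n (PySem.Int.floordiv (pvLoopB n 10) 10) := by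
  intro m
  induction m using Nat.strong_induction_on with
  | _ m ih =>
    intro n hm
    by_cases h : 10 < n
    · -- n > 10 : unroll both loops once
      have hfd := PySem.Int.floordiv_eq_ediv_of_pos (a := n) (b := 10) (by omega)
      set n' := PySem.Int.floordiv n 10 with hn'
      have hlt : n'.toNat < m := by rw [hfd]; omega
      -- A side
      have hA : pvLoopA n 0 0 = PySem.Int.mod n 10 + 10 * pvLoopA n' 0 0 := by
        rw [pvLoopA, if_pos h, pvLoopA_acc _ _ _ _ rfl]; ring
      -- B side
      have hB : pvLoopB n 10 = 10 * pvLoopB n' 10 := by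
        rw [pvLoopB, if_pos ⟨by omega, by omega⟩]
        exact pvLoopB_shift _ n 10 rfl (by omega)
      obtain ⟨k, hk⟩ := pvLoopB_pow ((n' + 1 - 10).toNat) n' 10 rfl
      have hMpos : (0:Int) < 10 ^ k := by positivity
      have hPfd : PySem.Int.floordiv (pvLoopB n' 10) 10 = 10 ^ k := by
        rw [hk, PySem.Int.floordiv_eq_ediv_of_pos (by omega), Int.mul_ediv_cancel_left _ (by omega)]
      have hBfd : PySem.Int.floordiv (pvLoopB n 10) 10 = 10 * 10 ^ k := by
        rw [hB, hk, PySem.Int.floordiv_eq_ediv_of_pos (by omega)]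
        rw [show (10:Int) * (10 * 10 ^ k) = (10 * 10 ^ k) * 10 by ring,
          Int.mul_ediv_cancel _ (by omega)]
      rw [hA, ih _ hlt n' rfl, hPfd, hBfd,
        PySem.Int.mod_eq_emod_of_pos (by positivity),
        PySem.Int.mod_eq_emod_of_pos (by omega),
        PySem.Int.mod_eq_emod_of_pos (by omega),
        pv_emod_split n (10 ^ k) hMpos, hfd]
    · -- n ≤ 10 : A returns 0
      rw [pvLoopA, if_neg h]
      by_cases h10 : n = 10
      · subst h10
        rw [pvLoopB, if_pos ⟨le_refl _, le_refl _⟩, pvLoopB, if_neg (by omega)]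
        decide
      · rw [pvLoopB, if_neg (by omega)]
        have : PySem.Int.floordiv 10 10 = 1 := by decide
        rw [this, PySem.Int.mod_eq_emod_of_pos (by omega)]
        omega

-- ===== VERDICT (by name: the statement is the Claim_ definition above) =====
theorem EliminaPrimerDig_spec : Claim_equal_EliminaPrimerDig := by
  intro n _
  unfold Spec_EliminaPrimerDig EliminaPrimerDig EliminaPrimerDig_alt
  exact pv_main n.toNat n rfl
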